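-- pv_equiv track=rewrite | github.com/bridgecoresystems-cmd/LanG | back/apps/users/services.py | to_septenary
-- ===== SOURCE A (Python) =====
-- def to_septenary(n):
--     """Convert a decimal number to base 7 (septenary) string."""
--     if n == 0:
--         return '0'
--     digits = []
--     while n:
--         digits.append(str(n % 7))
--         n //= 7
--     return ''.join(reversed(digits))
-- ===== SOURCE B (Python) =====
-- def to_septenary(n):
--     """Convert a decimal number to base 7 (septenary) string."""
--     if n == 0:
--         return '0'
--     p = 1
--     while p * 7 <= n:
--         p *= 7
--     out = ''
--     while p > 0:
--         out += str(n // p)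
--         n %= p
--         p //= 7
--     return out
-- ===== Notes on version B (the rewrite author's own statement) =====
-- stated objective: alternative
-- what changed: Instead of collecting remainders least-significant-first and reversing, B first computes the highest power of 7 not exceeding n and then emits digits most-significant-first by dividing by descending powers of 7.
import Mathlib
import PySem

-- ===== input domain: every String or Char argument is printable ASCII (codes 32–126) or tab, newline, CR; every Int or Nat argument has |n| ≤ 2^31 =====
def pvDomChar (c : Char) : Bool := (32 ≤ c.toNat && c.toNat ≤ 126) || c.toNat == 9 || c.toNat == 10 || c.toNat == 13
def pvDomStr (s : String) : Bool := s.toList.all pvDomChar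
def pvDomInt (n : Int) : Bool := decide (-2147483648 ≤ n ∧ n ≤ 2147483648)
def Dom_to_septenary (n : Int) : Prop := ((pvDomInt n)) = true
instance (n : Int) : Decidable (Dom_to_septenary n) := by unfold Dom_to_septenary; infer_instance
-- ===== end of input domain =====

-- B replaces A's remainder-collect-then-reverse loop by a different algorithm: it first
-- finds the highest power of 7 not exceeding n, then emits digits most-significant-first
-- by dividing by descending powers of 7. Return values proved equal for 0 ≤ n.

-- ===== PORT A =====
-- the while loop; fuel is only a termination device (n.toNat + 1 steps always suffice on Pre_)
def loopA : Nat → Int → List String → List String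
  | 0, _, digits => digits
  | f + 1, n, digits =>
    if n = 0 then digits
    else loopA f (PySem.Int.floordiv n 7) (digits ++ [PySem.Int.toStr (PySem.Int.mod n 7)])

def to_septenary (n : Int) : String :=
  if n = 0 then "0"
  else PySem.Str.join "" ((loopA (n.toNat + 1) n []).reverse)

-- ===== PORT B =====
-- 'while p * 7 <= n: p *= 7'; fuel is only a termination device (n.toNat + 1 always suffices)
def powB : Nat → Int → Int → Int
  | 0, _, p => p
  | f + 1, n, p => if p * 7 ≤ n then powB f n (p * 7) else p

-- 'while p > 0: out += str(n // p); n %= p; p //= 7'; fuel a termination device as above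
def digB : Nat → Int → Int → String → String
  | 0, _, _, out => out
  | f + 1, n, p, out =>
    if 0 < p then
      digB f (PySem.Int.mod n p) (PySem.Int.floordiv p 7)
        (out ++ PySem.Int.toStr (PySem.Int.floordiv n p))
    else out

def to_septenary_alt (n : Int) : String :=
  if n = 0 then "0"
  else digB (n.toNat + 1) n (powB (n.toNat + 1) n 1) ""

-- ===== PRECONDITION & SPEC =====
-- Pre_ excludes negative n: there A's while loop never terminates (A returns no value),
-- so equivalence is claimed on the non-negative inputs only.
def Pre_to_septenary (n : Int) : Prop := 0 ≤ n
instance (n : Int) : Decidable (Pre_to_septenary n) := by unfold Pre_to_septenary; infer_instance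
def pvWitness_to_septenary : Int := (10)

def Spec_to_septenary (n : Int) (out : String) : Prop := out = to_septenary_alt n
instance (n : Int) (out : String) : Decidable (Spec_to_septenary n out) := by unfold Spec_to_septenary; infer_instance

-- ===== CLAIM (what is proved, stated in full; the proofs are below) =====
def Claim_equal_to_septenary : Prop := ∀ (n : Int), Dom_to_septenary n → Pre_to_septenary n → Spec_to_septenary n (to_septenary n)

-- ===== LEMMAS AND PROOFS =====

-- canonical base-7 string, most significant digit first (proof-side helper)
def rep : Nat → Int → String
  | 0, _ => ""
  | f + 1, n => if n = 0 then "" else rep f (n / 7) ++ PySem.Int.toStr (n % 7)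

-- base-7 string of n with exactly k+1 digits, leading zeros included (proof-side helper)
def pad : Nat → Int → String
  | 0, n => PySem.Int.toStr n
  | k + 1, n => pad k (n / 7) ++ PySem.Int.toStr (n % 7)

-- accumulator lemma for A's loop
theorem loopA_acc (f : Nat) : ∀ (n : Int) (digits : List String),
    loopA f n digits = digits ++ loopA f n [] := by
  induction f with
  | zero => intro n digits; simp [loopA]
  | succ f ih =>
    intro n digits
    by_cases h : n = 0
    · simp [loopA, h]
    · simp only [loopA, if_neg h]
      rw [ih _ (digits ++ _), ih _ ([] ++ _)]
      simp

-- ''.join over xs ++ [y], at the List Char level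
theorem chars_join_aux : ∀ (l : List (List Char)) (y : List Char),
    PySem.Chars.join [] (l ++ [y]) = PySem.Chars.join [] l ++ y := by
  intro l
  induction l with
  | nil => intro y; simp [PySem.Chars.join_singleton, PySem.Chars.join_nil]
  | cons a l ih =>
    intro y
    cases l with
    | nil => simp [PySem.Chars.join_cons_cons, PySem.Chars.join_singleton]
    | cons b l' =>
      rw [List.cons_append, List.cons_append, PySem.Chars.join_cons_cons,
        PySem.Chars.join_cons_cons, ← List.cons_append, ih]
      simp

-- ''.join over xs ++ [y]
theorem join_empty_append_singleton (xs : List String) (y : String) :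
    PySem.Str.join "" (xs ++ [y]) = PySem.Str.join "" xs ++ y := by
  apply String.toList_injective
  simp only [PySem.Str.toList_join, String.toList_append, List.map_append, List.map_cons,
    List.map_nil]
  have h0 : ("" : String).toList = [] := rfl
  rw [h0]
  exact chars_join_aux (xs.map String.toList) y.toList

-- A's loop, reversed and joined, is the canonical MSB-first string
theorem sideA : ∀ (f : Nat) (n : Int), 0 ≤ n → n.toNat < f →
    PySem.Str.join "" ((loopA f n []).reverse) = rep f n := by
  intro f
  induction f with
  | zero => intro n _ hf; omega
  | succ f ih =>
    intro n hn hf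
    by_cases h : n = 0
    · subst h; rfl
    · have h7 : PySem.Int.floordiv n 7 = n / 7 := PySem.Int.floordiv_eq_ediv_of_pos (by omega)
      have hm : PySem.Int.mod n 7 = n % 7 := PySem.Int.mod_eq_emod_of_pos (by omega)
      simp only [loopA, rep, if_neg h]
      rw [loopA_acc]
      simp only [List.nil_append, List.singleton_append, List.reverse_cons]
      rw [join_empty_append_singleton, hm, h7]
      rw [ih (n / 7) (by omega) (by omega)]

-- MSB-side unfolding of pad
theorem pad_msb : ∀ (k : Nat) (n : Int),
    pad (k + 1) n = PySem.Int.toStr (n / 7 ^ (k + 1)) ++ pad k (n % 7 ^ (k + 1)) := by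
  intro k
  induction k with
  | zero =>
    intro n; simp [pad]
  | succ k ih =>
    intro n
    have e1 : n / 7 / 7 ^ (k + 1) = n / 7 ^ (k + 2) := by
      rw [Int.ediv_ediv_of_nonneg (by norm_num)]
      congr 1
      ring
    have e2 : n / 7 % 7 ^ (k + 1) = n % 7 ^ (k + 2) / 7 := by
      have hd : n % 7 ^ (k + 2) = n + (-(7 ^ (k + 1) * (n / 7 ^ (k + 2)))) * 7 := by
        rw [Int.emod_def]; ring
      rw [hd, Int.add_mul_ediv_right _ _ (by norm_num : (7:Int) ≠ 0)]
      rw [Int.emod_def, e1]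
      ring
    have e3 : n % 7 ^ (k + 2) % 7 = n % 7 := by
      have hdvd : (7:Int) ∣ 7 ^ (k + 2) := dvd_pow_self 7 (by omega)
      exact Int.emod_emod_of_dvd n hdvd
    calc pad (k + 2) n = pad (k + 1) (n / 7) ++ PySem.Int.toStr (n % 7) := rfl
      _ = PySem.Int.toStr (n / 7 / 7 ^ (k + 1)) ++ pad k (n / 7 % 7 ^ (k + 1))
            ++ PySem.Int.toStr (n % 7) := by rw [ih]
      _ = _ := by rw [e1, e2, ← e3]; simp [pad, String.append_assoc]

theorem digB_zero_p (f : Nat) (n : Int) (out : String) : digB f n 0 out = out := by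
  cases f <;> simp [digB]

-- B's digit loop started at power 7^k writes the (k+1)-digit padded representation
theorem digB_pad : ∀ (k : Nat) (f : Nat) (n : Int) (out : String), 0 ≤ n → k < f →
    digB f n ((7:Int) ^ k) out = out ++ pad k n := by
  intro k
  induction k with
  | zero =>
    intro f n out hn hf
    cases f with
    | zero => omega
    | succ f =>
      simp only [digB, pow_zero, if_pos (by norm_num : (0:Int) < 1)]
      have h1 : PySem.Int.mod n 1 = 0 := by
        rw [PySem.Int.mod_eq_emod_of_pos (by norm_num)]; simp
      have h2 : PySem.Int.floordiv (1:Int) 7 = 0 := by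
        rw [PySem.Int.floordiv_eq_ediv_of_pos (by norm_num)]; decide
      have h3 : PySem.Int.floordiv n 1 = n := by
        rw [PySem.Int.floordiv_eq_ediv_of_pos (by norm_num)]; simp
      rw [h1, h2, h3, digB_zero_p]
      rfl
  | succ k ih =>
    intro f n out hn hf
    cases f with
    | zero => omega
    | succ f =>
      have hp : (0:Int) < 7 ^ (k + 1) := by positivity
      simp only [digB, if_pos hp]
      have h1 : PySem.Int.mod n (7 ^ (k + 1)) = n % 7 ^ (k + 1) :=
        PySem.Int.mod_eq_emod_of_pos hp
      have h2 : PySem.Int.floordiv ((7:Int) ^ (k + 1)) 7 = 7 ^ k := by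
        rw [PySem.Int.floordiv_eq_ediv_of_pos (by norm_num)]
        rw [pow_succ]
        exact Int.mul_ediv_cancel _ (by norm_num)
      have h3 : PySem.Int.floordiv n (7 ^ (k + 1)) = n / 7 ^ (k + 1) :=
        PySem.Int.floordiv_eq_ediv_of_pos hp
      rw [h1, h2, h3]
      rw [ih f (n % 7 ^ (k + 1)) _ (Int.emod_nonneg n (by positivity)) (by omega)]
      rw [pad_msb, String.append_assoc]

-- the padded representation has no leading zero when 7^k ≤ n, and equals rep
theorem pad_rep : ∀ (k : Nat) (g : Nat) (n : Int), (7:Int) ^ k ≤ n → n < 7 ^ (k + 1) →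
    n.toNat < g → pad k n = rep g n := by
  intro k
  induction k with
  | zero =>
    intro g n h1 h2 hg
    cases g with
    | zero => omega
    | succ g =>
      have hn0 : n ≠ 0 := by omega
      have hd : n / 7 = 0 := by omega
      have hm : n % 7 = n := by omega
      simp only [pad, rep, if_neg hn0, hd, hm]
      cases g <;> simp [rep]
  | succ k ih =>
    intro g n h1 h2 hg
    cases g with
    | zero => omega
    | succ g =>
      have hn0 : n ≠ 0 := by
        have : (0:Int) < 7 ^ (k + 1) := by positivity
        omega
      have hb1 : (7:Int) ^ k ≤ n / 7 := by
        have : (7:Int) ^ (k + 1) = 7 ^ k * 7 := by ring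
        rw [this] at h1
        omega
      have hb2 : n / 7 < 7 ^ (k + 1) := by
        have : (7:Int) ^ (k + 2) = 7 ^ (k + 1) * 7 := by ring
        rw [this] at h2
        omega
      simp only [pad, rep, if_neg hn0]
      rw [ih g (n / 7) hb1 hb2 (by omega)]

-- powB finds a power of 7 bracketing n
theorem powB_spec : ∀ (f : Nat) (j : Nat) (n : Int), (7:Int) ^ j ≤ n → n < 7 ^ j * 7 ^ f →
    ∃ k : Nat, powB f n ((7:Int) ^ j) = 7 ^ k ∧ 7 ^ k ≤ n ∧ n < 7 ^ (k + 1) := by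
  intro f
  induction f with
  | zero =>
    intro j n h1 h2
    simp at h2
    omega
  | succ f ih =>
    intro j n h1 h2
    by_cases h : (7:Int) ^ j * 7 ≤ n
    · have e : (7:Int) ^ j * 7 = 7 ^ (j + 1) := by ring
      simp only [powB]
      rw [if_pos h, e]
      apply ih (j + 1) n (by omega)
      have : (7:Int) ^ (j + 1) * 7 ^ f = 7 ^ j * 7 ^ (f + 1) := by ring
      omega
    · simp only [powB, if_neg h]
      exact ⟨j, rfl, h1, by rw [pow_succ]; omega⟩

-- n < 7 ^ (n.toNat + 1) for 0 ≤ n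
theorem lt_pow_fuel (n : Int) (hn : 0 ≤ n) : n < (7:Int) ^ (n.toNat + 1) := by
  have h : n.toNat + 1 < 7 ^ (n.toNat + 1) :=
    Nat.lt_pow_self (n := n.toNat + 1) (a := 7) (by norm_num)
  have h2 : ((n.toNat + 1 : Nat) : Int) < ((7 ^ (n.toNat + 1) : Nat) : Int) := by exact_mod_cast h
  push_cast at h2
  omega

-- ===== VERDICT (by name: the statement is the Claim_ definition above) =====
theorem to_septenary_spec : Claim_equal_to_septenary := by
  intro n _ hpre
  have hn : (0:Int) ≤ n := hpre
  unfold Spec_to_septenary to_septenary to_septenary_alt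
  by_cases h : n = 0
  · simp [h]
  · simp only [if_neg h]
    have hpow : (7:Int) ^ 0 ≤ n := by
      rw [pow_zero]; omega
    obtain ⟨k, hk, hk1, hk2⟩ := powB_spec (n.toNat + 1) 0 n hpow
      (by simpa using lt_pow_fuel n hn)
    have hk' : powB (n.toNat + 1) n 1 = 7 ^ k := by
      have e : ((7:Int) ^ 0) = 1 := pow_zero 7
      rw [← e]; exact hk
    have hkfuel : k < n.toNat + 1 := by
      have h7k : k < 7 ^ k := Nat.lt_pow_self (n := k) (a := 7) (by norm_num)
      have h7k' : ((k:Int)) < ((7 ^ k : Nat) : Int) := by exact_mod_cast h7k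
      push_cast at h7k'
      omega
    rw [hk', digB_pad k (n.toNat + 1) n "" hn hkfuel]
    rw [sideA (n.toNat + 1) n hn (by omega)]
    rw [pad_rep k (n.toNat + 1) n hk1 hk2 (by omega)]
    rfl
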